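-- pv_equiv track=rewrite | github.com/amazon-science/Cyber-Zero | cyber_zero/trajectory_reformatter.py | _has_consecutive_end_of_edit
-- ===== SOURCE A (Python) =====
-- from typing import Dict, Any, List, Tuple, Optional, Set
--
-- def _has_consecutive_end_of_edit(conversations: List[Dict[str, Any]]) -> bool:
--     """Check for consecutive assistant turns with 'end_of_edit'."""
--     assistant_positions = []
--
--     for i, turn in enumerate(conversations):
--         if (turn.get('from') == 'assistant' and
--             'end_of_edit' in turn.get('value', '').lower()):
--             assistant_positions.append(i)
--
--     # Check for consecutive pairs
--     for i in range(len(assistant_positions) - 1):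
--         current_pos = assistant_positions[i]
--         next_pos = assistant_positions[i + 1]
--
--         # Find the next assistant turn after current_pos
--         next_assistant_pos = None
--         for j in range(current_pos + 1, len(conversations)):
--             if conversations[j].get('from') == 'assistant':
--                 next_assistant_pos = j
--                 break
--
--         # If consecutive, return True
--         if next_assistant_pos == next_pos:
--             return True
--
--     return False
-- ===== SOURCE B (Python) =====
-- from typing import Dict, Any, List
--
-- def _has_consecutive_end_of_edit(conversations: List[Dict[str, Any]]) -> bool:
--     """Single pass: remember whether the previous assistant turn contained 'end_of_edit'."""
--     prev_matched = False
--     for turn in conversations: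
--         if turn.get('from') == 'assistant':
--             cur_matched = 'end_of_edit' in turn.get('value', '').lower()
--             if prev_matched and cur_matched:
--                 return True
--             prev_matched = cur_matched
--     return False
-- ===== Notes on version B (the rewrite author's own statement) =====
-- stated objective: simpler
-- what changed: One forward pass that remembers whether the previous assistant turn contained 'end_of_edit', instead of collecting all matching positions and re-scanning the conversation for the next assistant turn for every adjacent pair.
import Mathlib
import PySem

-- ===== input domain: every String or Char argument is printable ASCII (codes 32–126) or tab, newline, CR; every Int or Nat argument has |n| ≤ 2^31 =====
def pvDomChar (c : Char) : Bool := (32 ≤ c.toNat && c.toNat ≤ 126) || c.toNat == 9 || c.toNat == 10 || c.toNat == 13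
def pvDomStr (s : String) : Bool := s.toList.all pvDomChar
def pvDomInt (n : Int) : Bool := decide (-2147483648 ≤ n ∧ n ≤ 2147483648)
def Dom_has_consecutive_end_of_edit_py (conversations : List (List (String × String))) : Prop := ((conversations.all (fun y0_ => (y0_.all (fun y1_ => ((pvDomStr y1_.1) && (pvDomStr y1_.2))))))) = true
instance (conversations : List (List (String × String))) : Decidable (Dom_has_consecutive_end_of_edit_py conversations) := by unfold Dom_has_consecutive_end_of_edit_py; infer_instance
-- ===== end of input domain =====

-- B replaces A's two-phase scan (collect matching positions, then re-scan for the next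
-- assistant turn per adjacent pair) by one forward pass remembering whether the previous
-- assistant turn matched; objective: simpler.

-- ===== PORT A =====
-- turn.get('from') == 'assistant'
def pvIsAssistant (turn : List (String × String)) : Bool :=
  PySem.Dict.get? (PySem.Dict.mk turn) "from" == some "assistant"

-- 'end_of_edit' in turn.get('value', '').lower()
def pvMatches (turn : List (String × String)) : Bool :=
  PySem.Str.isIn "end_of_edit" (PySem.Str.lower (PySem.Dict.getD (PySem.Dict.mk turn) "value" ""))

def has_consecutive_end_of_edit_py (conversations : List (List (String × String))) : Bool :=
  -- first loop: assistant_positions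
  let positions : List Int :=
    (PySem.List.enumerate conversations 0).foldl
      (fun acc p => if pvIsAssistant p.2 && pvMatches p.2 then acc ++ [p.1] else acc) []
  -- second loop (early return = any): for i in range(len(positions) - 1)
  (PySem.List.pyRange 0 ((positions.length : Int) - 1) 1).any (fun i =>
    let current_pos := PySem.List.pyGetD positions i 0
    let next_pos := PySem.List.pyGetD positions (i + 1) 0
    -- inner loop with break: first j in range(current_pos + 1, len) with an assistant turn
    let next_assistant_pos :=
      (PySem.List.pyRange (current_pos + 1) ((conversations.length : Int)) 1).find?
        (fun j => pvIsAssistant (PySem.List.pyGetD conversations j []))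
    next_assistant_pos == some next_pos)

-- ===== PORT B =====
def pvAltLoop (ts : List (List (String × String))) (prev : Bool) : Bool :=
  match ts with
  | [] => false
  | t :: r =>
    if pvIsAssistant t then
      if prev && pvMatches t then true
      else pvAltLoop r (pvMatches t)
    else pvAltLoop r prev

def has_consecutive_end_of_edit_py_alt (conversations : List (List (String × String))) : Bool :=
  pvAltLoop conversations false

-- ===== PRECONDITION & SPEC =====
def Spec_has_consecutive_end_of_edit_py (conversations : List (List (String × String))) (out : Bool) : Prop := out = has_consecutive_end_of_edit_py_alt conversations
instance (conversations : List (List (String × String))) (out : Bool) : Decidable (Spec_has_consecutive_end_of_edit_py conversations out) := by unfold Spec_has_consecutive_end_of_edit_py; infer_instance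

-- ===== CLAIM (what is proved, stated in full; the proofs are below) =====
def Claim_equal_has_consecutive_end_of_edit_py : Prop := ∀ (conversations : List (List (String × String))), Dom_has_consecutive_end_of_edit_py conversations → Spec_has_consecutive_end_of_edit_py conversations (has_consecutive_end_of_edit_py conversations)

-- ===== LEMMAS AND PROOFS =====

-- 'conversations[i] is an assistant turn' / 'matching assistant turn', over Nat indices
def pvPA (l : List (List (String × String))) (i : Nat) : Bool := pvIsAssistant (l.getD i [])
def pvPM (l : List (List (String × String))) (i : Nat) : Bool :=
  pvIsAssistant (l.getD i []) && pvMatches (l.getD i [])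

-- the common characterization: two matching assistant turns with no assistant turn between
def pvE (l : List (List (String × String))) : Prop :=
  ∃ p q : Nat, p < q ∧ q < l.length ∧ pvPM l p = true ∧ pvPM l q = true ∧
    ∀ r : Nat, p < r → r < q → pvPA l r = false

lemma find?_pyRange_eq_some (p : Int → Bool) (a b q : Int) :
    (PySem.List.pyRange a b 1).find? p = some q ↔
      (a ≤ q ∧ q < b ∧ p q = true ∧ ∀ r, a ≤ r → r < q → p r = false) := by
  obtain ⟨n, hn⟩ : ∃ n, (b - a).toNat = n := ⟨_, rfl⟩
  induction n generalizing a with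
  | zero =>
    have hba : b ≤ a := by omega
    rw [PySem.List.pyRange_one_eq_nil hba]
    simp only [List.find?_nil]
    constructor
    · intro h; cases h
    · rintro ⟨h1, h2, -, -⟩; omega
  | succ n ih =>
    have hab : a < b := by omega
    rw [PySem.List.pyRange_one_cons hab, List.find?_cons]
    cases hpa : p a with
    | true =>
      simp only []
      constructor
      · rintro ⟨rfl⟩
        exact ⟨le_refl _, hab, hpa, fun r h1 h2 => absurd (lt_of_le_of_lt h1 h2) (lt_irrefl _)⟩
      · rintro ⟨h1, h2, hq, hall⟩
        rcases eq_or_lt_of_le h1 with rfl | hlt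
        · rfl
        · exact absurd hpa (by simp [hall a le_rfl hlt])
    | false =>
      simp only []
      rw [ih (a + 1) (by omega)]
      constructor
      · rintro ⟨h1, h2, hq, hall⟩
        exact ⟨by omega, h2, hq, fun r hr1 hr2 => by
          rcases eq_or_lt_of_le hr1 with rfl | h
          · exact hpa
          · exact hall r (by omega) hr2⟩
      · rintro ⟨h1, h2, hq, hall⟩
        have : a < q := by
          rcases eq_or_lt_of_le h1 with rfl | h
          · exact absurd hq (by simp [hpa])
          · exact h
        exact ⟨by omega, h2, hq, fun r hr1 hr2 => hall r (by omega) hr2⟩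

lemma altLoop_iff (l : List (List (String × String))) (prev : Bool) :
    pvAltLoop l prev = true ↔
      ((∃ q : Nat, q < l.length ∧ pvPM l q = true ∧ prev = true ∧
          ∀ r : Nat, r < q → pvPA l r = false) ∨ pvE l) := by
  induction l generalizing prev with
  | nil =>
    simp only [pvAltLoop, pvE]
    constructor
    · intro h; cases h
    · rintro (⟨q, hq, -⟩ | ⟨p, q, -, hq, -⟩) <;> simp at hq
  | cons t ts ih =>
    have hPA0 : pvPA (t :: ts) 0 = pvIsAssistant t := by simp [pvPA]
    have hPM0 : pvPM (t :: ts) 0 = (pvIsAssistant t && pvMatches t) := by simp [pvPM]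
    have hPAs : ∀ r : Nat, pvPA (t :: ts) (r + 1) = pvPA ts r := by intro r; simp [pvPA]
    have hPMs : ∀ r : Nat, pvPM (t :: ts) (r + 1) = pvPM ts r := by intro r; simp [pvPM]
    by_cases hA : pvIsAssistant t = true
    · by_cases hpm : prev = true ∧ pvMatches t = true
      · have : pvAltLoop (t :: ts) prev = true := by
          simp [pvAltLoop, hA, hpm.1, hpm.2]
        rw [this]
        simp only [true_iff]
        left
        exact ⟨0, by simp, by simp [hPM0, hA, hpm.2], hpm.1, fun r hr => absurd hr (by omega)⟩
      · have hL : pvAltLoop (t :: ts) prev = pvAltLoop ts (pvMatches t) := by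
          rcases Bool.eq_false_or_eq_true prev with hp | hp <;>
            rcases Bool.eq_false_or_eq_true (pvMatches t) with hm | hm <;>
              simp [pvAltLoop, hA, hp, hm]
          exact absurd ⟨hp, hm⟩ hpm
        rw [hL, ih]
        constructor
        · rintro (⟨q, hq, hqm, hm, hall⟩ | ⟨p, q, hpq, hq, hpm', hqm, hall⟩)
          · -- D1(ts, matches) → E(t::ts) with p = 0
            right
            refine ⟨0, q + 1, by omega, by simpa using hq, by simp [hPM0, hA, hm],
              by simpa [hPMs] using hqm, ?_⟩
            rintro ⟨⟩ h1 h2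
            · omega
            · next r => exact (hPAs r).trans (hall r (by omega))
          · right
            refine ⟨p + 1, q + 1, by omega, by simpa using hq, by simpa [hPMs] using hpm',
              by simpa [hPMs] using hqm, ?_⟩
            rintro ⟨⟩ h1 h2
            · omega
            · next r => exact (hPAs r).trans (hall r (by omega) (by omega))
        · rintro (⟨q, hq, hqm, hprev, hall⟩ | ⟨p, q, hpq, hq, hpm', hqm, hall⟩)
          · -- D1(t::ts, prev) is impossible here
            match q, hq, hqm, hall with
            | 0, hq, hqm, hall =>
              rw [hPM0] at hqm
              exact absurd ⟨hprev, (Bool.and_eq_true _ _ |>.mp hqm).2⟩ hpm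
            | q + 1, hq, hqm, hall =>
              have := hall 0 (by omega)
              rw [hPA0] at this
              exact absurd hA (by simp [this])
          · match p, q, hpq, hq, hpm', hqm, hall with
            | 0, q + 1, hpq, hq, hpm', hqm, hall =>
              left
              rw [hPM0] at hpm'
              refine ⟨q, by simpa using hq, by simpa [hPMs] using hqm,
                (Bool.and_eq_true _ _ |>.mp hpm').2, ?_⟩
              intro r hr
              have := hall (r + 1) (by omega) (by omega)
              rwa [hPAs] at this
            | p + 1, q + 1, hpq, hq, hpm', hqm, hall =>
              right
              refine ⟨p, q, by omega, by simpa using hq, by simpa [hPMs] using hpm',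
                by simpa [hPMs] using hqm, ?_⟩
              intro r h1 h2
              have := hall (r + 1) (by omega) (by omega)
              rwa [hPAs] at this
    · have hAf : pvIsAssistant t = false := by simpa using hA
      have hL : pvAltLoop (t :: ts) prev = pvAltLoop ts prev := by
        simp [pvAltLoop, hAf]
      rw [hL, ih]
      constructor
      · rintro (⟨q, hq, hqm, hprev, hall⟩ | ⟨p, q, hpq, hq, hpm', hqm, hall⟩)
        · left
          refine ⟨q + 1, by simpa using hq, by simpa [hPMs] using hqm, hprev, ?_⟩
          rintro ⟨⟩ h
          · rw [hPA0]; exact hAf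
          · next r => exact (hPAs r).trans (hall r (by omega))
        · right
          refine ⟨p + 1, q + 1, by omega, by simpa using hq, by simpa [hPMs] using hpm',
            by simpa [hPMs] using hqm, ?_⟩
          rintro ⟨⟩ h1 h2
          · omega
          · next r => exact (hPAs r).trans (hall r (by omega) (by omega))
      · rintro (⟨q, hq, hqm, hprev, hall⟩ | ⟨p, q, hpq, hq, hpm', hqm, hall⟩)
        · match q, hq, hqm, hall with
          | 0, hq, hqm, hall =>
            rw [hPM0] at hqm
            exact absurd ((Bool.and_eq_true _ _).mp hqm).1 (by simp [hAf])
          | q + 1, hq, hqm, hall =>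
            left
            refine ⟨q, by simpa using hq, by simpa [hPMs] using hqm, hprev, ?_⟩
            intro r hr
            have := hall (r + 1) (by omega)
            rwa [hPAs] at this
        · match p, q, hpq, hq, hpm', hqm, hall with
          | 0, q, hpq, hq, hpm', hqm, hall =>
            rw [hPM0] at hpm'
            exact absurd ((Bool.and_eq_true _ _).mp hpm').1 (by simp [hAf])
          | p + 1, q + 1, hpq, hq, hpm', hqm, hall =>
            right
            refine ⟨p, q, by omega, by simpa using hq, by simpa [hPMs] using hpm',
              by simpa [hPMs] using hqm, ?_⟩
            intro r h1 h2
            have := hall (r + 1) (by omega) (by omega)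
            rwa [hPAs] at this

lemma alt_iff (l : List (List (String × String))) :
    has_consecutive_end_of_edit_py_alt l = true ↔ pvE l := by
  unfold has_consecutive_end_of_edit_py_alt
  rw [altLoop_iff]
  constructor
  · rintro (⟨q, -, -, h, -⟩ | h)
    · cases h
    · exact h
  · exact Or.inr

lemma positions_eq (l : List (List (String × String))) :
    (PySem.List.enumerate l 0).foldl
      (fun acc p => if pvIsAssistant p.2 && pvMatches p.2 then acc ++ [p.1] else acc) [] =
    (PySem.List.pyRange 0 (l.length : Int) 1).filter
      (fun j => pvIsAssistant (PySem.List.pyGetD l j []) && pvMatches (PySem.List.pyGetD l j [])) := by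
  rw [PySem.List.enumerate_eq_map_pyRange (d := [])]
  rw [PySem.List.foldl_append_if
    (p := fun x : Int × List (String × String) => pvIsAssistant x.2 && pvMatches x.2)
    (f := fun x : Int × List (String × String) => x.1)
    ((PySem.List.pyRange 0 (PySem.List.len l) 1).map (fun j => (j, PySem.List.pyGetD l j []))) []]
  rw [List.filter_map, List.map_map]
  simp [PySem.List.len_eq, Function.comp_def]

lemma pyGetD_toNat_getD (l : List (List (String × String))) (j : Int) (h0 : 0 ≤ j)
    (h1 : j < (l.length : Int)) : PySem.List.pyGetD l j [] = l.getD j.toNat [] := by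
  rw [PySem.List.pyGetD_eq_getElem l [] h0 h1]
  rw [List.getD_eq_getElem l [] (by omega)]

lemma a_iff (l : List (List (String × String))) :
    has_consecutive_end_of_edit_py l = true ↔ pvE l := by
  simp only [has_consecutive_end_of_edit_py, positions_eq]
  set g : Int → Bool := fun j => pvIsAssistant (PySem.List.pyGetD l j []) && pvMatches (PySem.List.pyGetD l j []) with hg
  set Q : List Int := (PySem.List.pyRange 0 (l.length : Int) 1).filter g with hQ
  have hmem : ∀ x : Int, x ∈ Q ↔ (0 ≤ x ∧ x < (l.length : Int) ∧ g x = true) := by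
    intro x
    rw [hQ, List.mem_filter, PySem.List.mem_pyRange_one]
    tauto
  have hgpm : ∀ x : Int, 0 ≤ x → x < (l.length : Int) → g x = pvPM l x.toNat := by
    intro x h0 h1
    rw [hg]
    simp only [pyGetD_toNat_getD l x h0 h1, pvPM]
  have hpair : Q.Pairwise (· < ·) := List.Pairwise.filter _ (PySem.List.pairwise_lt_pyRange_one 0 _)
  have hmono : ∀ i j (hi : i < Q.length) (hj : j < Q.length), i < j → Q[i] < Q[j] :=
    fun i j hi hj h => (List.pairwise_iff_getElem.mp hpair) i j hi hj h
  rw [List.any_eq_true]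
  constructor
  · rintro ⟨i, hi, hφ⟩
    rw [PySem.List.mem_pyRange_one] at hi
    obtain ⟨hi0, hi1⟩ := hi
    have hklen : i.toNat + 1 < Q.length := by omega
    have hgi : PySem.List.pyGetD Q i 0 = Q[i.toNat] :=
      PySem.List.pyGetD_eq_getElem Q 0 hi0 (by omega)
    have hgi1 : PySem.List.pyGetD Q (i + 1) 0 = Q[i.toNat + 1] := by
      rw [PySem.List.pyGetD_eq_getElem Q (i := i + 1) 0 (by omega) (by omega)]
      congr 1
      all_goals omega
    simp only [hgi, hgi1, beq_iff_eq, find?_pyRange_eq_some] at hφ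
    obtain ⟨h1, h2, h3, h4⟩ := hφ
    set p := Q[i.toNat] with hp
    set q := Q[i.toNat + 1] with hq
    have hpmem := (hmem p).mp (List.getElem_mem _)
    have hqmem := (hmem q).mp (List.getElem_mem _)
    refine ⟨p.toNat, q.toNat, by omega, by omega, ?_, ?_, ?_⟩
    · rw [← hgpm p hpmem.1 hpmem.2.1]; exact hpmem.2.2
    · rw [← hgpm q hqmem.1 hqmem.2.1]; exact hqmem.2.2
    · intro r hr1 hr2
      have := h4 (r : Int) (by omega) (by omega)
      rw [pyGetD_toNat_getD l r (by omega) (by omega), Int.toNat_natCast] at this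
      exact this
  · rintro ⟨p, q, hpq, hqlen, hpm, hqm, hall⟩
    have hpQ : (p : Int) ∈ Q := (hmem p).mpr ⟨by omega, by omega, by
      rw [hgpm _ (by omega) (by omega)]; simpa using hpm⟩
    have hqQ : (q : Int) ∈ Q := (hmem q).mpr ⟨by omega, by omega, by
      rw [hgpm _ (by omega) (by omega)]; simpa using hqm⟩
    obtain ⟨kp, hkp, hkpv⟩ := List.getElem_of_mem hpQ
    obtain ⟨kq, hkq, hkqv⟩ := List.getElem_of_mem hqQ
    have hkplt : kp < kq := by
      rcases Nat.lt_trichotomy kp kq with h | h | h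
      · exact h
      · exfalso; subst h; rw [hkpv] at hkqv; omega
      · exfalso; have := hmono kq kp hkq hkp h; rw [hkpv, hkqv] at this; omega
    have hadj : kq = kp + 1 := by
      by_contra h
      have hk1 : kp + 1 < kq := by omega
      have hk1' : kp + 1 < Q.length := by omega
      have hlt1 : (p : Int) < Q[kp + 1] := by
        have := hmono kp (kp + 1) hkp hk1' (by omega); rwa [hkpv] at this
      have hlt2 : Q[kp + 1] < (q : Int) := by
        have := hmono (kp + 1) kq hk1' hkq hk1; rwa [hkqv] at this
      have hmmem := (hmem _).mp (List.getElem_mem hk1')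
      have hpa := hall (Q[kp + 1]'hk1').toNat (by omega) (by omega)
      have hg' := hmmem.2.2
      rw [hgpm _ hmmem.1 hmmem.2.1] at hg'
      unfold pvPM at hg'
      unfold pvPA at hpa
      rw [((Bool.and_eq_true _ _).mp hg').1] at hpa
      cases hpa
    refine ⟨(kp : Int), ?_, ?_⟩
    · rw [PySem.List.mem_pyRange_one]; omega
    · have hgi : PySem.List.pyGetD Q (kp : Int) 0 = Q[kp] :=
        PySem.List.pyGetD_eq_getElem Q 0 (by omega) (by omega)
      have hgi1 : PySem.List.pyGetD Q ((kp : Int) + 1) 0 = Q[kp + 1]'(by omega) := by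
        rw [PySem.List.pyGetD_eq_getElem Q (i := (kp : Int) + 1) 0 (by omega) (by omega)]
        congr 1
      simp only [hgi, hgi1, beq_iff_eq, find?_pyRange_eq_some]
      rw [hkpv, show Q[kp + 1]'(by omega) = Q[kq]'hkq by congr 1; omega, hkqv]
      refine ⟨by omega, by omega, ?_, ?_⟩
      · rw [pyGetD_toNat_getD l q (by omega) (by omega), Int.toNat_natCast]
        unfold pvPM at hqm
        exact ((Bool.and_eq_true _ _).mp hqm).1
      · intro r hr1 hr2
        rw [pyGetD_toNat_getD l r (by omega) (by omega)]
        have := hall r.toNat (by omega) (by omega)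
        unfold pvPA at this
        exact this

-- ===== VERDICT (by name: the statement is the Claim_ definition above) =====
theorem has_consecutive_end_of_edit_py_spec : Claim_equal_has_consecutive_end_of_edit_py := by
  intro l _
  unfold Spec_has_consecutive_end_of_edit_py
  have h := (a_iff l).trans (alt_iff l).symm
  cases hA : has_consecutive_end_of_edit_py l <;> cases hB : has_consecutive_end_of_edit_py_alt l <;>
    simp_all
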